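-- pv_equiv track=rewrite | github.com/vietcuong2004/PYTHON_TLU | Test_1/Bai_3.py | k_ngay_sau
-- ===== SOURCE A (Python) =====
-- def nam_nhuan(y):
-- 	if (y%400 == 0) or ((y%4 == 0) and (y%100 != 0)):
-- 		return 1
-- 	else:
-- 		return 0
--
-- def so_ngay(days_of_month, month, year):
-- 	# Tháng 4,6,9,11 có 30 ngày:
-- 	if (month in [4,6,9,11]):
-- 		days_of_month = 30
-- 	# Tháng 1,3,5,7,8,10,12 có 31 ngày:
-- 	elif(month in [1,3,5,7,8,10,12]):
-- 		days_of_month = 31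
-- 	# Tháng 2:
-- 	else:
-- 		if (nam_nhuan(year) == 1):
-- 			days_of_month = 29
-- 		else:
-- 			days_of_month = 28
-- 	return days_of_month
--
-- def k_ngay_sau(d,m,y,k):
-- 	for i in range (1,k+1):
-- 		d = d+1
-- 	# Sau khi cộng, ngày d đã vượt quá số ngày của tháng đó
-- 	# => Ngày mồng 1 của tháng tiếp theo:
-- 		if (d > so_ngay(d,m,y)):
-- 			d =1
-- 			m = m+1
-- 			if (m >12):
-- 				m = 1
-- 				y = y+1
-- 	return d,m,y
-- ===== SOURCE B (Python) =====
-- def so_ngay_thang(m, y):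
--     if m in (1, 3, 5, 7, 8, 10, 12):
--         return 31
--     if m in (4, 6, 9, 11):
--         return 30
--     return 29 if (y % 4 == 0 and (y % 100 != 0 or y % 400 == 0)) else 28
--
-- def k_ngay_sau(d, m, y, k):
--     while k > 0:
--         rem = so_ngay_thang(m, y) - d + 1  # days left until day 1 of the next month
--         if k < rem:
--             return d + k, m, y
--         k -= rem
--         d = 1
--         m += 1
--         if m > 12:
--             m = 1
--             y += 1
--     return d, m, y
-- ===== Notes on version B (the rewrite author's own statement) =====
-- stated objective: alternative
-- what changed: Replaces A's day-by-day incrementing loop (one iteration per day) with a month-at-a-time jump loop that subtracts the whole remainder of each month from k at once (one iteration per month crossed).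
-- outside the precondition, e.g. on k_ngay_sau(40, 2, 2021, 1): A returns (1, 3, 2021), B returns (13, 3, 2021)
import Mathlib
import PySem

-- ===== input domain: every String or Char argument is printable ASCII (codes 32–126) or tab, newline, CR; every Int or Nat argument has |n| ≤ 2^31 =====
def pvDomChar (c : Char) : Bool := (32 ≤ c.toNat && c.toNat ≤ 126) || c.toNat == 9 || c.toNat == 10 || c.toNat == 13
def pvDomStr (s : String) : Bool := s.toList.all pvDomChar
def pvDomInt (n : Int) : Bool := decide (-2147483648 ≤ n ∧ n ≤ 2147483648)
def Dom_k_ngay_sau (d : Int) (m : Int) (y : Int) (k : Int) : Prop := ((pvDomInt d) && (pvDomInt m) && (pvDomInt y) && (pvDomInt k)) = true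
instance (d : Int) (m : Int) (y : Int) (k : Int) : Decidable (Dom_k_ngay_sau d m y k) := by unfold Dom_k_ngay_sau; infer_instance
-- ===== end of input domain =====

-- B replaces A's day-by-day loop with a month-at-a-time jump (it subtracts the whole
-- remainder of each month from k at once); one loop iteration per month crossed instead of
-- one per day.

-- ===== PORT A =====
def nam_nhuan (y : Int) : Int :=
  if PySem.Int.mod y 400 = 0 ∨ (PySem.Int.mod y 4 = 0 ∧ PySem.Int.mod y 100 ≠ 0) then 1 else 0

def so_ngay (days_of_month : Int) (month : Int) (year : Int) : Int :=
  if month ∈ [(4:Int), 6, 9, 11] then 30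
  else if month ∈ [(1:Int), 3, 5, 7, 8, 10, 12] then 31
  else if nam_nhuan year = 1 then 29 else 28

-- the body of A's for-loop, acting on the state (d, m, y)
def kStep (s : Int × Int × Int) : Int × Int × Int :=
  let d := s.1 + 1
  let m := s.2.1
  let y := s.2.2
  if d > so_ngay d m y then
    let d := (1 : Int)
    let m := m + 1
    if m > 12 then (d, 1, y + 1) else (d, m, y)
  else (d, m, y)

def k_ngay_sau (d : Int) (m : Int) (y : Int) (k : Int) : List Int :=
  let s := (PySem.List.pyRange 1 (k + 1) 1).foldl (fun s _ => kStep s) (d, m, y)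
  [s.1, s.2.1, s.2.2]

-- ===== PORT B =====
def soNgayThang (m : Int) (y : Int) : Int :=
  if m ∈ [(1:Int), 3, 5, 7, 8, 10, 12] then 31
  else if m ∈ [(4:Int), 6, 9, 11] then 30
  else if (y % 4 == 0 && (y % 100 != 0 || y % 400 == 0)) then 29 else 28

-- B's while-loop: one recursive call per month crossed.  The Nat fuel only makes the
-- recursion structural (total); the starting fuel in k_ngay_sau_alt is always sufficient.
def altGo : Nat → Int → Int → Int → Int → Int × Int × Int
  | 0, d, m, y, _ => (d, m, y)
  | fuel + 1, d, m, y, k =>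
    if k ≤ 0 then (d, m, y)
    else
      let rem := soNgayThang m y - d + 1
      if k < rem then (d + k, m, y)
      else
        let m' := m + 1
        if m' > 12 then altGo fuel 1 1 (y + 1) (k - rem) else altGo fuel 1 m' y (k - rem)

def k_ngay_sau_alt (d : Int) (m : Int) (y : Int) (k : Int) : List Int :=
  let s := altGo (k.toNat + d.toNat + 1) d m y k
  [s.1, s.2.1, s.2.2]

-- ===== PRECONDITION & SPEC =====
-- Pre_ excludes invalid start days past the end of the month (d > month length): there A
-- accidentally snaps to day 1 of the next month on the first increment while B carries the
-- overflow into its date arithmetic; neither accidental value is the specified one.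
def Pre_k_ngay_sau (d : Int) (m : Int) (y : Int) (k : Int) : Prop :=
  d ≤ soNgayThang m y
instance (d : Int) (m : Int) (y : Int) (k : Int) : Decidable (Pre_k_ngay_sau d m y k) := by
  unfold Pre_k_ngay_sau; infer_instance

def pvWitness_k_ngay_sau : Int × Int × Int × Int := (15, 6, 2024, 100)

def Spec_k_ngay_sau (d : Int) (m : Int) (y : Int) (k : Int) (out : List Int) : Prop := out = k_ngay_sau_alt d m y k
instance (d : Int) (m : Int) (y : Int) (k : Int) (out : List Int) : Decidable (Spec_k_ngay_sau d m y k out) := by unfold Spec_k_ngay_sau; infer_instance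

-- ===== CLAIM (what is proved, stated in full; the proofs are below) =====
def Claim_equal_k_ngay_sau : Prop := ∀ (d : Int) (m : Int) (y : Int) (k : Int), Dom_k_ngay_sau d m y k → Pre_k_ngay_sau d m y k → Spec_k_ngay_sau d m y k (k_ngay_sau d m y k)

-- ===== LEMMAS AND PROOFS =====

-- month lengths are at least 28
theorem soNgayThang_ge (m : Int) (y : Int) : 28 ≤ soNgayThang m y := by
  unfold soNgayThang; split_ifs <;> norm_num

-- A's leap-year flag agrees with B's boolean leap test
theorem nam_nhuan_eq (y : Int) : nam_nhuan y = 1 ↔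
    (y % 4 == 0 && (y % 100 != 0 || y % 400 == 0)) = true := by
  unfold nam_nhuan
  rw [PySem.Int.mod_eq_emod_of_pos (b := 400) (by norm_num),
      PySem.Int.mod_eq_emod_of_pos (b := 4) (by norm_num),
      PySem.Int.mod_eq_emod_of_pos (b := 100) (by norm_num)]
  simp only [Bool.and_eq_true, beq_iff_eq, Bool.or_eq_true, bne_iff_ne, ne_eq]
  split_ifs with h <;> constructor <;> intro h2 <;> omega

-- A's so_ngay ignores its first argument and equals B's month-length helper.
theorem so_ngay_eq (x : Int) (m : Int) (y : Int) : so_ngay x m y = soNgayThang m y := by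
  unfold so_ngay soNgayThang
  by_cases h30 : m ∈ [(4:Int), 6, 9, 11]
  · have h31 : m ∉ [(1:Int), 3, 5, 7, 8, 10, 12] := by
      simp only [List.mem_cons, List.not_mem_nil, or_false] at h30 ⊢; omega
    rw [if_pos h30, if_neg h31, if_pos h30]
  · by_cases h31 : m ∈ [(1:Int), 3, 5, 7, 8, 10, 12]
    · rw [if_neg h30, if_pos h31, if_pos h31]
    · rw [if_neg h30, if_neg h31, if_neg h31, if_neg h30]
      by_cases hy : nam_nhuan y = 1
      · rw [if_pos hy, if_pos ((nam_nhuan_eq y).mp hy)]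
      · rw [if_neg hy, if_neg (fun hc => hy ((nam_nhuan_eq y).mpr hc))]

-- folding a constant-state step over any list is iterating it (A ignores the loop index)
theorem foldl_const_iterate {α β : Type} (f : α → α) (l : List β) (s : α) :
    l.foldl (fun s _ => f s) s = f^[l.length] s := by
  induction l generalizing s with
  | nil => rfl
  | cons a t ih => simp [List.foldl_cons, ih, Function.iterate_succ_apply]

-- as long as the day stays within the month, each of A's steps just increments d
theorem iterate_in_month (m : Int) (y : Int) (j : Nat) :
    ∀ d : Int, d + j ≤ soNgayThang m y → kStep^[j] (d, m, y) = (d + j, m, y) := by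
  induction j with
  | zero => intro d _; simp
  | succ j ih =>
    intro d h
    have hstep : kStep (d, m, y) = (d + 1, m, y) := by
      unfold kStep
      simp only [so_ngay_eq]
      rw [if_neg (by push_cast at h ⊢; omega)]
    rw [Function.iterate_succ_apply, hstep, ih (d + 1) (by push_cast at h ⊢; omega)]
    congr 1
    push_cast
    ring

-- main invariant: with d within the month and enough fuel, A's n-fold step equals B's loop
theorem iterate_eq_altGo (fuel : Nat) : ∀ (n : Nat) (d m y : Int), d ≤ soNgayThang m y →
    (n : Int) ≤ (fuel : Int) → kStep^[n] (d, m, y) = altGo fuel d m y (n : Int) := by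
  induction fuel with
  | zero =>
    intro n d m y _ hnf
    have hn0 : n = 0 := by omega
    subst hn0; simp [altGo]
  | succ fuel ih =>
    intro n d m y hd hnf
    rcases Nat.eq_zero_or_pos n with h0 | hpos
    · subst h0; simp [altGo]
    set N := soNgayThang m y with hN
    have hrem : (0:Int) < N - d + 1 := by omega
    by_cases hlt : (n : Int) < N - d + 1
    · -- the whole jump stays inside the month
      rw [iterate_in_month m y n d (by omega)]
      simp only [altGo]
      rw [if_neg (by exact_mod_cast by omega), if_pos hlt]
    · -- cross into the next month after rem = N - d + 1 steps
      set rem : Int := N - d + 1 with hremdef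
      set r : Nat := rem.toNat with hr
      have hrcast : (r : Int) = rem := Int.toNat_of_nonneg (by omega)
      have hr1 : 1 ≤ r := by omega
      have hrn : r ≤ n := by omega
      have hroll : kStep^[r] (d, m, y) =
          (if m + 1 > 12 then ((1:Int), (1:Int), y + 1) else (1, m + 1, y)) := by
        have : r = (r - 1) + 1 := by omega
        rw [this, Function.iterate_succ_apply']
        rw [iterate_in_month m y (r - 1) d (by omega)]
        simp only [kStep, so_ngay_eq]
        rw [if_pos (by omega)]
      have hsplit : kStep^[n] (d, m, y) = kStep^[n - r] (kStep^[r] (d, m, y)) := by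
        rw [← Function.iterate_add_apply]
        congr 1
        omega
      rw [hsplit, hroll]
      have hcast : ((n - r : Nat) : Int) = (n : Int) - rem := by omega
      have hfuel : ((n - r : Nat) : Int) ≤ (fuel : Int) := by push_cast at hnf ⊢; omega
      by_cases h12 : m + 1 > 12
      · rw [if_pos h12]
        rw [ih (n - r) 1 1 (y + 1) (by have := soNgayThang_ge 1 (y + 1); omega) hfuel]
        rw [hcast]
        conv_rhs => simp only [altGo]
        rw [if_neg (by exact_mod_cast by omega), if_neg (by omega), if_pos h12]
      · rw [if_neg h12]
        rw [ih (n - r) 1 (m + 1) y (by have := soNgayThang_ge (m + 1) y; omega) hfuel]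
        rw [hcast]
        conv_rhs => simp only [altGo]
        rw [if_neg (by exact_mod_cast by omega), if_neg (by omega), if_neg h12]

-- ===== VERDICT (by name: the statement is the Claim_ definition above) =====
theorem k_ngay_sau_spec : Claim_equal_k_ngay_sau := by
  unfold Claim_equal_k_ngay_sau
  intro d m y k _ hpre
  unfold Spec_k_ngay_sau k_ngay_sau k_ngay_sau_alt
  rw [foldl_const_iterate, PySem.List.length_pyRange_one]
  by_cases hk : k ≤ 0
  · have h0 : (k + 1 - 1).toNat = 0 := by omega
    rw [h0]
    simp only [altGo]
    rw [if_pos hk]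
    rfl
  · have hcast : ((k + 1 - 1).toNat : Int) = k := by omega
    rw [iterate_eq_altGo (k.toNat + d.toNat + 1) (k + 1 - 1).toNat d m y hpre
      (by push_cast; omega), hcast]
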